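-- pv_equiv track=rewrite | github.com/Yasaswini6/AI_Project | content_analyzer.py | analyze_topics
-- ===== SOURCE A (Python) =====
-- def analyze_topics(text):
--     """Identify potential topics in the text"""
--     topic_indicators = {
--         "work": {'job', 'work', 'boss', 'career', 'office', 'manager', 'colleague', 'coworker', 'promotion', 'salary', 'raise'},
--         "relationships": {'friend', 'partner', 'spouse', 'wife', 'husband', 'boyfriend', 'girlfriend', 'relationship', 'family'},
--         "health": {'health', 'sick', 'illness', 'doctor', 'hospital', 'pain', 'symptom', 'disease', 'medication'},
--         "mental_health": {'anxiety', 'depression', 'stress', 'therapy', 'mental', 'emotional', 'feeling', 'mood'},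
--         "future": {'future', 'plan', 'goal', 'dream', 'aspiration', 'hope', 'expect', 'anticipate'},
--         "achievement": {'promotion', 'achieved', 'success', 'win', 'award', 'recognition', 'praise', 'compliment', 'bonus', 'achievement'}
--     }
--
--     words = set(text.lower().split())
--     detected_topics = []
--
--     for topic, indicators in topic_indicators.items():
--         if any(word in indicators for word in words):
--             detected_topics.append(topic)
--
--     return detected_topics
-- ===== SOURCE B (Python) =====
-- def analyze_topics(text):
--     """Identify potential topics in the text (flat keyword table + flag array)"""
--     keyword_topic = [
--         ('job', 0), ('work', 0), ('boss', 0), ('career', 0), ('office', 0),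
--         ('manager', 0), ('colleague', 0), ('coworker', 0), ('promotion', 0),
--         ('salary', 0), ('raise', 0),
--         ('friend', 1), ('partner', 1), ('spouse', 1), ('wife', 1), ('husband', 1),
--         ('boyfriend', 1), ('girlfriend', 1), ('relationship', 1), ('family', 1),
--         ('health', 2), ('sick', 2), ('illness', 2), ('doctor', 2), ('hospital', 2),
--         ('pain', 2), ('symptom', 2), ('disease', 2), ('medication', 2),
--         ('anxiety', 3), ('depression', 3), ('stress', 3), ('therapy', 3),
--         ('mental', 3), ('emotional', 3), ('feeling', 3), ('mood', 3),
--         ('future', 4), ('plan', 4), ('goal', 4), ('dream', 4), ('aspiration', 4),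
--         ('hope', 4), ('expect', 4), ('anticipate', 4),
--         ('promotion', 5), ('achieved', 5), ('success', 5), ('win', 5), ('award', 5),
--         ('recognition', 5), ('praise', 5), ('compliment', 5), ('bonus', 5),
--         ('achievement', 5),
--     ]
--     names = ['work', 'relationships', 'health', 'mental_health', 'future', 'achievement']
--     flags = [False] * 6
--     for w in text.lower().split():
--         for kw, i in keyword_topic:
--             if kw == w:
--                 flags[i] = True
--     return [names[i] for i in range(6) if flags[i]]
-- ===== Notes on version B (the rewrite author's own statement) =====
-- stated objective: alternative
-- what changed: B replaces A's dict of per-topic keyword sets scanned against the word set with a flat (keyword, topic-index) table and a boolean flag array: one pass over the words marks flags, and the result is read off the flag array in declaration order.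
import Mathlib
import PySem

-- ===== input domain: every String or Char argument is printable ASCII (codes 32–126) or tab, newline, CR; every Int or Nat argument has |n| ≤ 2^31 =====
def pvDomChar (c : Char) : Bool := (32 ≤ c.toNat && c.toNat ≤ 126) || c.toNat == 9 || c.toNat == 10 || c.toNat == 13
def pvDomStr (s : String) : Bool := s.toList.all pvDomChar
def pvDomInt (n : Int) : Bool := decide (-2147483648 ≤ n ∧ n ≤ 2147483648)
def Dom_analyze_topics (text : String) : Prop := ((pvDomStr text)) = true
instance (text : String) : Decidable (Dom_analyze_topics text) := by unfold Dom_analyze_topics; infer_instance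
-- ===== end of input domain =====

-- B replaces A's per-topic keyword-set scans with a flat (keyword, topic-index) table and a
-- boolean flag array marked in one pass over the words (alternative decomposition, same result).

-- ===== PORT A =====
-- A's dict of topic -> keyword set (insertion order), the keyword sets as their distinct elements
def pvTopics : List (String × List String) := [
  ("work", ["job", "work", "boss", "career", "office", "manager", "colleague", "coworker", "promotion", "salary", "raise"]),
  ("relationships", ["friend", "partner", "spouse", "wife", "husband", "boyfriend", "girlfriend", "relationship", "family"]),
  ("health", ["health", "sick", "illness", "doctor", "hospital", "pain", "symptom", "disease", "medication"]),
  ("mental_health", ["anxiety", "depression", "stress", "therapy", "mental", "emotional", "feeling", "mood"]),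
  ("future", ["future", "plan", "goal", "dream", "aspiration", "hope", "expect", "anticipate"]),
  ("achievement", ["promotion", "achieved", "success", "win", "award", "recognition", "praise", "compliment", "bonus", "achievement"])]

def analyze_topics (text : String) : List String :=
  let words : PySem.Set String := PySem.Set.ofList (PySem.Str.split₀ (PySem.Str.lower text))
  pvTopics.foldl
    (fun acc p => if words.any (fun w => PySem.Set.contains p.2 w) then acc ++ [p.1] else acc) []

-- ===== PORT B =====
-- B-side data: the flat (keyword, topic-index) table and the topic-name array
def pvKT : List (String × Nat) := [
  ("job", 0), ("work", 0), ("boss", 0), ("career", 0), ("office", 0),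
  ("manager", 0), ("colleague", 0), ("coworker", 0), ("promotion", 0),
  ("salary", 0), ("raise", 0),
  ("friend", 1), ("partner", 1), ("spouse", 1), ("wife", 1), ("husband", 1),
  ("boyfriend", 1), ("girlfriend", 1), ("relationship", 1), ("family", 1),
  ("health", 2), ("sick", 2), ("illness", 2), ("doctor", 2), ("hospital", 2),
  ("pain", 2), ("symptom", 2), ("disease", 2), ("medication", 2),
  ("anxiety", 3), ("depression", 3), ("stress", 3), ("therapy", 3),
  ("mental", 3), ("emotional", 3), ("feeling", 3), ("mood", 3),
  ("future", 4), ("plan", 4), ("goal", 4), ("dream", 4), ("aspiration", 4),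
  ("hope", 4), ("expect", 4), ("anticipate", 4),
  ("promotion", 5), ("achieved", 5), ("success", 5), ("win", 5), ("award", 5),
  ("recognition", 5), ("praise", 5), ("compliment", 5), ("bonus", 5),
  ("achievement", 5)]

def pvNames : List String := ["work", "relationships", "health", "mental_health", "future", "achievement"]

def analyze_topics_alt (text : String) : List String :=
  let flags : List Bool :=
    (PySem.Str.split₀ (PySem.Str.lower text)).foldl
      (fun fs w => pvKT.foldl (fun fs q => if q.1 == w then fs.set q.2 true else fs) fs)
      [false, false, false, false, false, false]
  ((List.range 6).filter (fun i => flags.getD i false)).map (fun i => pvNames.getD i "")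

-- ===== PRECONDITION & SPEC =====
def Spec_analyze_topics (text : String) (out : List String) : Prop := out = analyze_topics_alt text
instance (text : String) (out : List String) : Decidable (Spec_analyze_topics text out) := by unfold Spec_analyze_topics; infer_instance

-- ===== CLAIM (what is proved, stated in full; the proofs are below) =====
def Claim_equal_analyze_topics : Prop := ∀ (text : String), Dom_analyze_topics text → Spec_analyze_topics text (analyze_topics text)

-- ===== LEMMAS AND PROOFS =====

-- 'for kw,i in table: if kw==w: flags[i]=True' preserves the flag array's length
theorem pv_scan_length (l : List (String × Nat)) (w : String) (fs : List Bool) :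
    (l.foldl (fun fs q => if q.1 == w then fs.set q.2 true else fs) fs).length = fs.length := by
  induction l generalizing fs with
  | nil => rfl
  | cons q l ih =>
    rw [List.foldl_cons]
    split
    · rw [ih, List.length_set]
    · rw [ih]

theorem pv_set_getD (fs : List Bool) (j i : Nat) (hi : i < fs.length) :
    ((fs.set j true).getD i false = true) ↔ (fs.getD i false = true ∨ j = i) := by
  by_cases h : j = i
  · subst h
    simp [List.getD_eq_getElem?_getD, hi]
  · simp [List.getD_eq_getElem?_getD, h]

-- the inner table scan: flag i ends true iff it started true or some pair (w, i) is in the table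
theorem pv_scan_getD (l : List (String × Nat)) (w : String) (fs : List Bool) (i : Nat) (hi : i < fs.length) :
    ((l.foldl (fun fs q => if q.1 == w then fs.set q.2 true else fs) fs).getD i false = true) ↔
      (fs.getD i false = true ∨ ∃ q ∈ l, q.1 = w ∧ q.2 = i) := by
  induction l generalizing fs with
  | nil => simp
  | cons q l ih =>
    rw [List.foldl_cons]
    by_cases hq : (q.1 == w) = true
    · rw [if_pos hq]
      rw [ih (fs.set q.2 true) (by rw [List.length_set]; exact hi)]
      rw [pv_set_getD fs q.2 i hi]
      simp only [List.mem_cons, beq_iff_eq] at hq ⊢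
      constructor
      · rintro ((h | h) | h)
        · exact Or.inl h
        · exact Or.inr ⟨q, Or.inl rfl, hq, h⟩
        · obtain ⟨p, hp, h⟩ := h; exact Or.inr ⟨p, Or.inr hp, h⟩
      · rintro (h | ⟨p, (rfl | hp), h1, h2⟩)
        · exact Or.inl (Or.inl h)
        · exact Or.inl (Or.inr h2)
        · exact Or.inr ⟨p, hp, h1, h2⟩
    · rw [if_neg hq]
      rw [ih fs hi]
      simp only [List.mem_cons, beq_iff_eq] at hq ⊢
      constructor
      · rintro (h | ⟨p, hp, h⟩)
        · exact Or.inl h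
        · exact Or.inr ⟨p, Or.inr hp, h⟩
      · rintro (h | ⟨p, (rfl | hp), h1, h2⟩)
        · exact Or.inl h
        · exact absurd h1 hq
        · exact Or.inr ⟨p, hp, h1, h2⟩

-- the word loop: flag i ends true iff it started true or some word owns a table pair with index i
theorem pv_flags_getD (ws : List String) (fs : List Bool) (i : Nat) (hi : i < fs.length) :
    ((ws.foldl (fun fs w => pvKT.foldl (fun fs q => if q.1 == w then fs.set q.2 true else fs) fs) fs).getD i false = true) ↔
      (fs.getD i false = true ∨ ∃ w ∈ ws, ∃ q ∈ pvKT, q.1 = w ∧ q.2 = i) := by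
  induction ws generalizing fs with
  | nil => simp
  | cons w ws ih =>
    rw [List.foldl_cons]
    rw [ih _ (by rw [pv_scan_length]; exact hi)]
    rw [pv_scan_getD pvKT w fs i hi]
    simp only [List.mem_cons]
    constructor
    · rintro ((h | h) | h)
      · exact Or.inl h
      · obtain ⟨q, hq, h⟩ := h; exact Or.inr ⟨w, Or.inl rfl, q, hq, h⟩
      · obtain ⟨w', hw', h⟩ := h; exact Or.inr ⟨w', Or.inr hw', h⟩
    · rintro (h | ⟨w', (rfl | hw'), h⟩)
      · exact Or.inl (Or.inl h)
      · exact Or.inl (Or.inr h)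
      · exact Or.inr ⟨w', hw', h⟩

-- per topic index: owning a table pair with index i = being a keyword of topic i
theorem pv_kt_topic (w : String) (i : Nat) (hi : i < 6) :
    (∃ q ∈ pvKT, q.1 = w ∧ q.2 = i) ↔ w ∈ (pvTopics.getD i ("", [])).2 := by
  interval_cases i <;> simp [pvKT, pvTopics, eq_comm]

-- A's per-topic test = B's flag, for each of the six indices
theorem pv_cond_eq (ws : List String) (i : Nat) (hi : i < 6) :
    ((ws.foldl (fun fs w => pvKT.foldl (fun fs q => if q.1 == w then fs.set q.2 true else fs) fs)
        [false, false, false, false, false, false]).getD i false) =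
      (PySem.Set.ofList ws).any (fun w => PySem.Set.contains (pvTopics.getD i ("", [])).2 w) := by
  rw [Bool.eq_iff_iff]
  rw [pv_flags_getD ws [false, false, false, false, false, false] i (by simpa using hi)]
  have hfalse : ([false, false, false, false, false, false].getD i false) = false := by
    interval_cases i <;> rfl
  rw [hfalse]
  simp only [Bool.false_eq_true, false_or, List.any_eq_true, PySem.Set.mem_ofList,
    PySem.Set.contains_iff]
  constructor
  · rintro ⟨w, hw, h⟩
    exact ⟨w, hw, (pv_kt_topic w i hi).mp h⟩
  · rintro ⟨w, hw, h⟩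
    exact ⟨w, hw, (pv_kt_topic w i hi).mpr h⟩

theorem pv_main (text : String) : analyze_topics text = analyze_topics_alt text := by
  simp only [analyze_topics, analyze_topics_alt]
  generalize PySem.Str.split₀ (PySem.Str.lower text) = ws
  rw [PySem.List.foldl_append_if
        (fun (p : String × List String) =>
          (PySem.Set.ofList ws).any (fun w => PySem.Set.contains p.2 w))
        (fun p => p.1) pvTopics [], List.nil_append]
  have h0 := pv_cond_eq ws 0 (by norm_num)
  have h1 := pv_cond_eq ws 1 (by norm_num)
  have h2 := pv_cond_eq ws 2 (by norm_num)
  have h3 := pv_cond_eq ws 3 (by norm_num)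
  have h4 := pv_cond_eq ws 4 (by norm_num)
  have h5 := pv_cond_eq ws 5 (by norm_num)
  simp only [pvTopics, List.getD_cons_zero, List.getD_cons_succ] at h0 h1 h2 h3 h4 h5
  show (pvTopics.filter _).map _ = (([0,1,2,3,4,5] : List Nat).filter _).map _
  simp only [pvTopics, List.filter_cons, List.filter_nil]
  rw [h0, h1, h2, h3, h4, h5]
  split_ifs <;> rfl

-- ===== VERDICT (by name: the statement is the Claim_ definition above) =====
theorem analyze_topics_spec : Claim_equal_analyze_topics := by
  intro text _
  unfold Spec_analyze_topics
  exact pv_main text
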